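-- pv_equiv track=rewrite | github.com/PARKINHYO/Algorithm | BOJ/1475/1475.py | room_number
-- ===== SOURCE A (Python) =====
-- import sys, collections
--
-- def room_number(numbers: str):
--     plastics = collections.defaultdict(int)
--     for number in numbers:
--         if number == '6' or number == '9':
--             if plastics['6'] == plastics['9']:
--                 plastics[number] += 1
--             elif plastics['6'] < plastics['9']:
--                 plastics['6'] += 1
--             else:
--                 plastics['9'] += 1
--         else:
--             plastics[number] += 1
--     return collections.Counter(plastics).most_common()[0][1]
-- ===== SOURCE B (Python) =====
-- import collections
--
-- def room_number(numbers: str):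
--     counts = collections.Counter(numbers)
--     sixnine = counts['6'] + counts['9']
--     others = [v for k, v in counts.items() if k != '6' and k != '9']
--     return max([(sixnine + 1) // 2] + others)
-- ===== Notes on version B (the rewrite author's own statement) =====
-- stated objective: faster
-- what changed: Replaces the per-character balanced 6/9 bookkeeping and the final most_common sort by one Counter pass, the closed form (c6+c9+1)//2 for the shared 6/9 digit, and a running max over the adjusted counts.
import Mathlib
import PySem

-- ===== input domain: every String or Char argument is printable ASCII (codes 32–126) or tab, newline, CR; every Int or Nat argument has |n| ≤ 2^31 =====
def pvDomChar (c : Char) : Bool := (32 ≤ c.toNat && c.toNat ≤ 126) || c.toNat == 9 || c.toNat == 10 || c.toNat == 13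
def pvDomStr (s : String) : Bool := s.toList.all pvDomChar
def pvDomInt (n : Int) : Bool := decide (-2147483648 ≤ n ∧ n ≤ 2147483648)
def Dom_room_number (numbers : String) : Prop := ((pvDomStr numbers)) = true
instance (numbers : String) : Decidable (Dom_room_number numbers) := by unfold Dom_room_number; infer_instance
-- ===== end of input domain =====

-- B replaces A's per-character balanced 6/9 bookkeeping and final most_common sort by one
-- Counter pass, the closed form (c6+c9+1)//2 for the shared 6/9 digit, and a running max.

-- ===== PORT A =====
-- one iteration of A's loop body (the defaultdict reads plastics['6'] / plastics['9'] insert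
-- the key with default 0 when absent: setdefault)
def roomStep (d : PySem.Dict Char Int) (c : Char) : PySem.Dict Char Int :=
  if c == '6' || c == '9' then
    let d1 := (d.setdefault '6' 0).setdefault '9' 0
    if d1.getD '6' 0 = d1.getD '9' 0 then d1.modify c 0 (· + 1)
    else if d1.getD '6' 0 < d1.getD '9' 0 then d1.modify '6' 0 (· + 1)
    else d1.modify '9' 0 (· + 1)
  else d.modify c 0 (· + 1)


def room_number (numbers : String) : Int :=
  let plastics := numbers.toList.foldl roomStep PySem.Dict.empty
  match PySem.List.sorted plastics.items (fun p => p.2) true with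
  | [] => 0
  | p :: _ => p.2


-- ===== PORT B =====
def room_number_alt (numbers : String) : Int :=
  let counts := PySem.Dict.counter numbers.toList
  let sixnine := counts.getD '6' 0 + counts.getD '9' 0
  let others := (counts.items.filter (fun p => !(p.1 == '6') && !(p.1 == '9'))).map (·.2)
  others.foldl max (PySem.Int.floordiv (sixnine + 1) 2)


-- ===== PRECONDITION & SPEC =====
-- Pre_ excludes exactly the empty string, on which A raises IndexError (most_common()[0] of an empty Counter).
def Pre_room_number (numbers : String) : Prop := numbers.toList ≠ []
instance (numbers : String) : Decidable (Pre_room_number numbers) := by unfold Pre_room_number; infer_instance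
def pvWitness_room_number : String := "166"

def Spec_room_number (numbers : String) (out : Int) : Prop := out = room_number_alt numbers
instance (numbers : String) (out : Int) : Decidable (Spec_room_number numbers out) := by unfold Spec_room_number; infer_instance

-- ===== CLAIM (what is proved, stated in full; the proofs are below) =====
def Claim_equal_room_number : Prop := ∀ (numbers : String), Dom_room_number numbers → Pre_room_number numbers → Spec_room_number numbers (room_number numbers)

-- ===== LEMMAS AND PROOFS =====

-- Loop invariant for A's dictionary after processing cs: keys are distinct; every non-6/9
-- character is counted exactly; the '6' and '9' slots sum to the total number of 6s and 9s
-- and differ by at most one; both slots exist as soon as a 6 or 9 was seen.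
lemma roomA_inv (cs : List Char) :
    (cs.foldl roomStep PySem.Dict.empty).keys.Nodup ∧
    (∀ k : Char, k ≠ '6' → k ≠ '9' →
      (cs.foldl roomStep PySem.Dict.empty).getD k 0 = (cs.count k : Int) ∧
      ((cs.foldl roomStep PySem.Dict.empty).contains k = true ↔ k ∈ cs)) ∧
    ((cs.foldl roomStep PySem.Dict.empty).getD '6' 0 + (cs.foldl roomStep PySem.Dict.empty).getD '9' 0
        = (cs.count '6' : Int) + (cs.count '9' : Int) ∧
     (cs.foldl roomStep PySem.Dict.empty).getD '6' 0 - (cs.foldl roomStep PySem.Dict.empty).getD '9' 0 ≤ 1 ∧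
     (cs.foldl roomStep PySem.Dict.empty).getD '9' 0 - (cs.foldl roomStep PySem.Dict.empty).getD '6' 0 ≤ 1 ∧
     0 ≤ (cs.foldl roomStep PySem.Dict.empty).getD '6' 0 ∧
     0 ≤ (cs.foldl roomStep PySem.Dict.empty).getD '9' 0) ∧
    (((cs.foldl roomStep PySem.Dict.empty).contains '6' = true ↔ '6' ∈ cs ∨ '9' ∈ cs) ∧
     ((cs.foldl roomStep PySem.Dict.empty).contains '9' = true ↔ '6' ∈ cs ∨ '9' ∈ cs)) := by
  induction cs using List.reverseRecOn with
  | nil => simp [PySem.Dict.getD_empty, PySem.Dict.contains_empty]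
  | append_singleton cs c ih =>
    obtain ⟨hnd, hoth, harith, hmem6, hmem9⟩ := ih
    rw [List.foldl_append]
    simp only [List.foldl_cons, List.foldl_nil]
    set d := cs.foldl roomStep PySem.Dict.empty with hd
    by_cases hc : c = '6' ∨ c = '9'
    · have hbeq : (c == '6' || c == '9') = true := by
        rcases hc with h | h <;> simp [h]
      set d1 := (d.setdefault '6' 0).setdefault '9' 0 with hd1
      have hstep : roomStep d c =
          (if d1.getD '6' 0 = d1.getD '9' 0 then d1.modify c 0 (· + 1)
           else if d1.getD '6' 0 < d1.getD '9' 0 then d1.modify '6' 0 (· + 1)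
           else d1.modify '9' 0 (· + 1)) := by
        simp only [roomStep, hbeq, if_true]
        rw [← hd1]
      have g6 : d1.getD '6' 0 = d.getD '6' 0 := by
        rw [hd1, PySem.Dict.getD_eq_get?_getD,
            PySem.Dict.get?_setdefault_of_ne _ _ (by decide),
            ← PySem.Dict.getD_eq_get?_getD, PySem.Dict.getD_setdefault_self]
      have g9 : d1.getD '9' 0 = d.getD '9' 0 := by
        rw [hd1, PySem.Dict.getD_setdefault_self, PySem.Dict.getD_eq_get?_getD,
            PySem.Dict.get?_setdefault_of_ne _ _ (by decide),
            ← PySem.Dict.getD_eq_get?_getD]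
      have gk : ∀ k : Char, k ≠ '6' → k ≠ '9' → d1.getD k 0 = d.getD k 0 := by
        intro k h6 h9
        rw [hd1, PySem.Dict.getD_eq_get?_getD,
            PySem.Dict.get?_setdefault_of_ne _ _ h9,
            PySem.Dict.get?_setdefault_of_ne _ _ h6,
            ← PySem.Dict.getD_eq_get?_getD]
      have ck : ∀ k : Char, d1.contains k = (k == '9' || (k == '6' || d.contains k)) := by
        intro k
        rw [hd1, PySem.Dict.contains_setdefault, PySem.Dict.contains_setdefault]
      have hnd1 : d1.keys.Nodup := by
        by_cases h6 : d.contains '6' = true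
        · have h9 : d.contains '9' = true := hmem9.mpr (hmem6.mp h6)
          rw [hd1, PySem.Dict.setdefault_of_contains _ _ h6,
              PySem.Dict.setdefault_of_contains _ _ h9]
          exact hnd
        · have h9 : d.contains '9' = false := by
            rcases Bool.eq_false_or_eq_true (d.contains '9') with h | h
            · exact absurd (hmem6.mpr (hmem9.mp h)) (by simpa using h6)
            · exact h
          have m6 : ('6' : Char) ∉ d.keys := fun h =>
            (by simpa using h6 : ¬ _) ((PySem.Dict.contains_iff_mem_keys d _).mpr h)
          have m9 : ('9' : Char) ∉ d.keys := fun h =>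
            (by simpa using h9 : ¬ _) ((PySem.Dict.contains_iff_mem_keys d _).mpr h)
          have hk : d1.keys = (d.keys ++ ['6']) ++ ['9'] := by
            rw [hd1, PySem.Dict.keys_setdefault, PySem.Dict.keys_setdefault,
                PySem.Dict.contains_setdefault]
            simp [h6, h9]
          rw [hk]
          simp [List.nodup_append, hnd]
          exact fun a ha => ⟨fun e => m6 (e ▸ ha), fun e => m9 (e ▸ ha)⟩
      have hc1 : ∀ m : Char, m = '6' ∨ m = '9' → d1.contains m = true := by
        intro m hm; rcases hm with h | h <;> simp [ck, h]
      have hkeysmod : ∀ m : Char, m = '6' ∨ m = '9' →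
          (d1.modify m 0 (· + 1)).keys = d1.keys := by
        intro m hm
        rw [PySem.Dict.keys_modify, PySem.Dict.keys_insert_of_contains _ _ (hc1 m hm)]
      have gen : ∀ m : Char, m = '6' ∨ m = '9' →
          ((d1.modify m 0 (· + 1)).keys.Nodup ∧
           (∀ k : Char, k ≠ '6' → k ≠ '9' →
             (d1.modify m 0 (· + 1)).getD k 0 = ((cs ++ [c]).count k : Int) ∧
             ((d1.modify m 0 (· + 1)).contains k = true ↔ k ∈ cs ++ [c])) ∧
           ((d1.modify m 0 (· + 1)).contains '6' = true ↔ '6' ∈ cs ++ [c] ∨ '9' ∈ cs ++ [c]) ∧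
           ((d1.modify m 0 (· + 1)).contains '9' = true ↔ '6' ∈ cs ++ [c] ∨ '9' ∈ cs ++ [c])) := by
        intro m hm
        refine ⟨(hkeysmod m hm) ▸ hnd1, ?_, ?_, ?_⟩
        · intro k hk6 hk9
          have hkm : k ≠ m := by rcases hm with h | h <;> simp [h, hk6, hk9]
          have hkc : k ≠ c := by rcases hc with h | h <;> simp [h, hk6, hk9]
          constructor
          · rw [PySem.Dict.getD_modify, if_neg hkm, gk k hk6 hk9, (hoth k hk6 hk9).1]
            simp [List.count_append, List.count_singleton, Ne.symm hkc]
          · rw [PySem.Dict.contains_modify]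
            simp [hkm, ck, hk6, hk9, (hoth k hk6 hk9).2, hkc]
        · rw [PySem.Dict.contains_modify]
          simp only [ck]
          rcases hc with h | h <;> subst h <;> simp
        · rw [PySem.Dict.contains_modify]
          simp only [ck]
          rcases hc with h | h <;> subst h <;> simp
      rw [hstep]
      by_cases hb1 : d1.getD '6' 0 = d1.getD '9' 0
      · rw [if_pos hb1]
        obtain ⟨w1, w2, w3, w4⟩ := gen c hc
        refine ⟨w1, w2, ?_, w3, w4⟩
        rw [g6, g9] at hb1
        obtain ⟨a1, a2, a3, a4, a5⟩ := harith
        rcases hc with h | h <;> subst h <;>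
          simp [PySem.Dict.getD_modify, g6, g9, List.count_append, List.count_singleton] <;> omega
      · rw [if_neg hb1]
        by_cases hb2 : d1.getD '6' 0 < d1.getD '9' 0
        · rw [if_pos hb2]
          obtain ⟨w1, w2, w3, w4⟩ := gen '6' (Or.inl rfl)
          refine ⟨w1, w2, ?_, w3, w4⟩
          rw [g6, g9] at hb2
          obtain ⟨a1, a2, a3, a4, a5⟩ := harith
          rcases hc with h | h <;> subst h <;>
            simp [PySem.Dict.getD_modify, g6, g9, List.count_append, List.count_singleton] <;> omega
        · rw [if_neg hb2]
          obtain ⟨w1, w2, w3, w4⟩ := gen '9' (Or.inr rfl)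
          refine ⟨w1, w2, ?_, w3, w4⟩
          rw [g6, g9] at hb1 hb2
          obtain ⟨a1, a2, a3, a4, a5⟩ := harith
          rcases hc with h | h <;> subst h <;>
            simp [PySem.Dict.getD_modify, g6, g9, List.count_append, List.count_singleton] <;> omega
    · push_neg at hc
      obtain ⟨hc6, hc9⟩ := hc
      have hstep : roomStep d c = d.modify c 0 (· + 1) := by
        simp [roomStep, hc6, hc9]
      rw [hstep]
      refine ⟨?_, ?_, ?_, ?_, ?_⟩
      · rw [PySem.Dict.keys_modify]
        by_cases hcon : d.contains c = true
        · rw [PySem.Dict.keys_insert_of_contains _ _ hcon]; exact hnd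
        · rw [PySem.Dict.keys_insert_of_not_contains _ _ (by simpa using hcon)]
          simp [List.nodup_append, hnd]
          exact fun a ha e => hcon ((PySem.Dict.contains_iff_mem_keys d c).mpr (e ▸ ha))
      · intro k hk6 hk9
        constructor
        · rw [PySem.Dict.getD_modify]
          by_cases hkc : k = c
          · subst hkc
            simp [List.count_append, (hoth k hk6 hk9).1]
          · simp [hkc, (hoth k hk6 hk9).1, List.count_append,
              List.count_singleton, Ne.symm hkc]
        · rw [PySem.Dict.contains_modify]
          by_cases hkc : k = c
          · subst hkc; simp
          · simp [hkc, (hoth k hk6 hk9).2, Ne.symm hkc]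
      · have h6 : ('6' : Char) ≠ c := Ne.symm hc6
        have h9 : ('9' : Char) ≠ c := Ne.symm hc9
        simp only [PySem.Dict.getD_modify, if_neg h6, if_neg h9]
        simpa [List.count_append, List.count_singleton, hc6, hc9] using harith
      · rw [PySem.Dict.contains_modify]
        simp [Ne.symm hc6, Ne.symm hc9, hmem6]
      · rw [PySem.Dict.contains_modify]
        simp [Ne.symm hc6, Ne.symm hc9, hmem9]

-- A = B on every nonempty string: both sides equal the maximum of the adjusted counts.
theorem room_number_agree (numbers : String) (hpre : numbers.toList ≠ []) :
    room_number numbers = room_number_alt numbers := by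
  obtain ⟨hnd, hoth, ⟨hsum, hdf1, hdf2, hn6, hn9⟩, hmem6, hmem9⟩ := roomA_inv numbers.toList
  set cs := numbers.toList with hcs
  set d := cs.foldl roomStep PySem.Dict.empty with hdd
  have hceil : room_number_alt numbers =
      (((PySem.Dict.counter cs).items.filter (fun p => !(p.1 == '6') && !(p.1 == '9'))).map (Prod.snd)).foldl
        max (PySem.Int.floordiv ((cs.count '6' : Int) + (cs.count '9' : Int) + 1) 2) := by
    simp only [room_number_alt, ← hcs, PySem.Dict.getD_counter]
  set ceil := PySem.Int.floordiv ((cs.count '6' : Int) + (cs.count '9' : Int) + 1) 2 with hceil'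
  set others := ((PySem.Dict.counter cs).items.filter
      (fun p => !(p.1 == '6') && !(p.1 == '9'))).map (Prod.snd) with hoths
  have hothersmem : ∀ v : Int, v ∈ others ↔
      ∃ k : Char, k ∈ cs ∧ k ≠ '6' ∧ k ≠ '9' ∧ v = (cs.count k : Int) := by
    intro v
    rw [hoths]
    simp only [List.mem_map, List.mem_filter, PySem.Dict.items_counter]
    constructor
    · rintro ⟨p, ⟨⟨k', hk', rfl⟩, hflt⟩, rfl⟩
      rw [PySem.Set.mem_ofList] at hk'
      simp only [Bool.and_eq_true, Bool.not_eq_true', beq_eq_false_iff_ne] at hflt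
      exact ⟨k', hk', hflt.1, hflt.2, rfl⟩
    · rintro ⟨k, hk, h6, h9, rfl⟩
      refine ⟨(k, (cs.count k : Int)), ⟨⟨k, (PySem.Set.mem_ofList cs k).mpr hk, rfl⟩, ?_⟩, rfl⟩
      simp [h6, h9]
  have hkeysne : d.keys ≠ [] := by
    obtain ⟨c, cs', hcc⟩ := List.exists_cons_of_ne_nil hpre
    have hcmem : c ∈ cs := by rw [hcc]; exact List.mem_cons_self
    intro hnil
    by_cases h : c = '6' ∨ c = '9'
    · have hcon : d.contains '6' = true :=
        hmem6.mpr (by rcases h with h | h; exacts [Or.inl (h ▸ hcmem), Or.inr (h ▸ hcmem)])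
      rw [PySem.Dict.contains_iff_mem_keys, hnil] at hcon
      simp at hcon
    · push_neg at h
      have hcon := (hoth c h.1 h.2).2.mpr hcmem
      rw [PySem.Dict.contains_iff_mem_keys, hnil] at hcon
      simp at hcon
  have hitemsne : d.items ≠ [] := by
    intro h
    apply hkeysne
    simp [PySem.Dict.keys, h]
  obtain ⟨p, t, hs⟩ : ∃ p t, PySem.List.sorted d.items (fun q => q.2) true = p :: t := by
    cases h : PySem.List.sorted d.items (fun q => q.2) true with
    | nil => exact absurd ((PySem.List.sorted_eq_nil_iff _ _ _).mp h) hitemsne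
    | cons p t => exact ⟨p, t, rfl⟩
  have hA : room_number numbers = p.2 := by
    simp only [room_number, ← hcs, ← hdd, hs]
  have hub : ∀ q ∈ d.items, q.2 ≤ p.2 := PySem.List.key_head_sorted_rev_ge _ _ hs
  have hpmem : p ∈ d.items :=
    ((PySem.List.sorted_perm d.items (fun q => q.2) true).mem_iff).mp (hs ▸ List.mem_cons_self)
  have hkub : ∀ k ∈ d.keys, d.getD k 0 ≤ p.2 := by
    intro k hk
    have hmm : (k, d.getD k 0) ∈ d.items := by
      rw [PySem.Dict.items_eq_map_keys d hnd 0]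
      exact List.mem_map.mpr ⟨k, hk, rfl⟩
    exact hub _ hmm
  have hpk : d.getD p.1 0 = p.2 := by
    rcases p with ⟨k, v⟩
    exact PySem.Dict.getD_of_mem_items d hpmem hnd 0
  have hp1 : p.1 ∈ d.keys := PySem.Dict.mem_keys_of_mem_items d hpmem
  obtain ⟨hc_le, hoth_le⟩ := PySem.List.le_foldl_max others ceil
  have hAB : p.2 ≤ others.foldl max ceil := by
    by_cases h69 : p.1 = '6' ∨ p.1 = '9'
    · refine le_trans ?_ hc_le
      rw [← hpk, hceil', PySem.Int.floordiv_eq_ediv_of_pos (by norm_num)]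
      rcases h69 with h | h <;> rw [h] <;> omega
    · push_neg at h69
      have hcnt : p.2 = (cs.count p.1 : Int) := by
        rw [← hpk]; exact (hoth p.1 h69.1 h69.2).1
      have hmm : p.1 ∈ cs :=
        (hoth p.1 h69.1 h69.2).2.mp ((PySem.Dict.contains_iff_mem_keys d _).mpr hp1)
      exact hoth_le _ ((hothersmem _).mpr ⟨p.1, hmm, h69.1, h69.2, hcnt⟩)
  have hBA : others.foldl max ceil ≤ p.2 := by
    rcases PySem.List.foldl_max_mem others ceil with h | h
    · rw [h]
      by_cases hs0 : cs.count '6' = 0 ∧ cs.count '9' = 0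
      · have hz : ceil = 0 := by
          rw [hceil', hs0.1, hs0.2, PySem.Int.floordiv_eq_ediv_of_pos (by norm_num)]
          norm_num
        rw [hz, ← hpk]
        by_cases h69 : p.1 = '6' ∨ p.1 = '9'
        · rcases h69 with h' | h' <;> rw [h'] <;> [exact hn6; exact hn9]
        · push_neg at h69
          rw [(hoth _ h69.1 h69.2).1]
          exact Int.natCast_nonneg _
      · have hmm : '6' ∈ cs ∨ '9' ∈ cs := by
          rcases Nat.eq_zero_or_pos (cs.count '6') with h6 | h6
          · rcases Nat.eq_zero_or_pos (cs.count '9') with h9 | h9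
            · exact absurd ⟨h6, h9⟩ hs0
            · exact Or.inr (List.count_pos_iff.mp h9)
          · exact Or.inl (List.count_pos_iff.mp h6)
        have b6 := hkub '6' ((PySem.Dict.contains_iff_mem_keys d _).mp (hmem6.mpr hmm))
        have b9 := hkub '9' ((PySem.Dict.contains_iff_mem_keys d _).mp (hmem9.mpr hmm))
        rw [hceil', PySem.Int.floordiv_eq_ediv_of_pos (by norm_num)]
        omega
    · obtain ⟨k, hk, h6, h9, heq⟩ := (hothersmem _).mp h
      have hg : d.getD k 0 = (cs.count k : Int) := (hoth k h6 h9).1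
      have hkk : k ∈ d.keys :=
        (PySem.Dict.contains_iff_mem_keys d _).mp ((hoth k h6 h9).2.mpr hk)
      rw [heq, ← hg]
      exact hkub k hkk
  rw [hA, hceil]
  exact le_antisymm hAB hBA

-- ===== VERDICT (by name: the statement is the Claim_ definition above) =====
theorem room_number_spec : Claim_equal_room_number := by
  intro numbers _ hpre
  exact room_number_agree numbers hpre
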